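-- pv_equiv track=rewrite | github.com/sueszli/vector-database-benchmark | dataset/python-mutated/time-needed-to-rearrange-a-binary-string.py | secondsToRemoveOccurrences
-- ===== SOURCE A (Python) =====
-- def secondsToRemoveOccurrences(s):
--     if False:
--         i = 10
--         return i + 15
--     '\n        :type s: str\n        :rtype: int\n        '
--     result = cnt = 0
--     for c in s:
--         if c == '0':
--             cnt += 1
--             continue
--         if cnt:
--             result = max(result + 1, cnt)
--     return result
-- ===== SOURCE B (Python) =====
-- def secondsToRemoveOccurrences(s):
--     # Closed-form: collect the prefix-zero count z_j at each effective '1'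
--     # (non-'0' char with at least one '0' before it); the answer is
--     # max_j (z_j - j) + m, where m is how many such ones there are.
--     zs = []
--     zeros = 0
--     for c in s:
--         if c == '0':
--             zeros += 1
--         elif zeros:
--             zs.append(zeros)
--     best = 0
--     for j, z in enumerate(zs, 1):
--         best = max(best, z - j)
--     return best + len(zs)
-- ===== Notes on version B (the rewrite author's own statement) =====
-- stated objective: alternative
-- what changed: A maintains the answer through a running recurrence result = max(result+1, cnt); B instead collects the prefix-zero count z_j at each effective '1' and returns the explicit closed-form maximum max_j(z_j - j) + m over that list.
import Mathlib
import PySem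

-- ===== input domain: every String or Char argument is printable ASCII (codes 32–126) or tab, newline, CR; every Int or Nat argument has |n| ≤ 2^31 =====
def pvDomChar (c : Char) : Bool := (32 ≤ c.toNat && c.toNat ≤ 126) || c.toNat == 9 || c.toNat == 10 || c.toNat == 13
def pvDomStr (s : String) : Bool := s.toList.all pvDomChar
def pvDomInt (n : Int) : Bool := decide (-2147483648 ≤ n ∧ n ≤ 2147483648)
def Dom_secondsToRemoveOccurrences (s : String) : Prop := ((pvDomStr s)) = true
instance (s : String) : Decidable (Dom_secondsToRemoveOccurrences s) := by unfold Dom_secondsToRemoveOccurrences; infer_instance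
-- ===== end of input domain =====

-- B replaces A's running max-recurrence by an explicit closed-form maximum
-- (collect prefix-zero counts, answer = max_j (z_j - j) + m); alternative, same cost.

-- ===== PORT A =====
-- A: single pass keeping (result, cnt); the dead 'if False' block is dropped.
def pvStepA (rc : Int × Int) (c : Char) : Int × Int :=
  if c = '0' then (rc.1, rc.2 + 1)
  else if rc.2 ≠ 0 then (max (rc.1 + 1) rc.2, rc.2)
  else rc

def secondsToRemoveOccurrences (s : String) : Int :=
  (s.toList.foldl pvStepA (0, 0)).1

-- ===== PORT B =====
-- first loop of Source B: build (zs, zeros)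
def pvStepB (st : List Int × Int) (c : Char) : List Int × Int :=
  if c = '0' then (st.1, st.2 + 1)
  else if st.2 ≠ 0 then (st.1 ++ [st.2], st.2)
  else st

def pvCollectZs (s : String) : List Int × Int :=
  s.toList.foldl pvStepB ([], 0)

-- second loop of Source B: best = max over enumerate(zs, 1) of (z - j)
def pvBestOf (zs : List Int) : Int :=
  (zs.zipIdx 1).foldl (fun b q => max b (q.1 - (q.2 : Int))) 0

def secondsToRemoveOccurrences_alt (s : String) : Int :=
  let p := pvCollectZs s
  pvBestOf p.1 + (p.1.length : Int)

-- ===== PRECONDITION & SPEC =====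
def Spec_secondsToRemoveOccurrences (s : String) (out : Int) : Prop := out = secondsToRemoveOccurrences_alt s
instance (s : String) (out : Int) : Decidable (Spec_secondsToRemoveOccurrences s out) := by unfold Spec_secondsToRemoveOccurrences; infer_instance

-- ===== CLAIM (what is proved, stated in full; the proofs are below) =====
def Claim_equal_secondsToRemoveOccurrences : Prop := ∀ (s : String), Dom_secondsToRemoveOccurrences s → Spec_secondsToRemoveOccurrences s (secondsToRemoveOccurrences s)

-- ===== LEMMAS AND PROOFS =====

lemma pvBestOf_append (zs : List Int) (z : Int) :
    pvBestOf (zs ++ [z]) = max (pvBestOf zs) (z - ((zs.length : Int) + 1)) := by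
  unfold pvBestOf
  rw [List.zipIdx_append, List.foldl_append]
  simp only [List.zipIdx_cons, List.zipIdx_nil, List.foldl_cons, List.foldl_nil]
  congr 1
  push_cast
  ring

lemma pvLoop_eq (l : List Char) (zs : List Int) (zeros : Int) :
    List.foldl pvStepA (pvBestOf zs + (zs.length : Int), zeros) l
      = (pvBestOf (List.foldl pvStepB (zs, zeros) l).1
           + (((List.foldl pvStepB (zs, zeros) l).1.length : Int)),
         (List.foldl pvStepB (zs, zeros) l).2) := by
  induction l generalizing zs zeros with
  | nil => simp
  | cons c t ih =>
    simp only [List.foldl_cons]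
    by_cases h0 : c = '0'
    · simpa [pvStepA, pvStepB, h0] using ih zs (zeros + 1)
    · by_cases hz : zeros ≠ 0
      · have hstep : pvStepA (pvBestOf zs + (zs.length : Int), zeros) c
            = (pvBestOf (zs ++ [zeros]) + ((zs ++ [zeros]).length : Int), zeros) := by
          simp only [pvStepA, h0, if_false, List.length_append,
            List.length_cons, List.length_nil, pvBestOf_append]
          rw [if_pos hz]
          push_cast
          simp only [Prod.mk.injEq, and_true]
          rcases le_total (pvBestOf zs) (zeros - ((zs.length : Int) + 1)) with h | h <;>
            simp [max_def] <;> omega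
        rw [hstep]
        have hstepB : pvStepB (zs, zeros) c = (zs ++ [zeros], zeros) := by
          simp [pvStepB, h0, hz]
        rw [hstepB]
        exact ih (zs ++ [zeros]) zeros
      · simpa [pvStepA, pvStepB, h0, hz] using ih zs zeros

-- ===== VERDICT (by name: the statement is the Claim_ definition above) =====
theorem secondsToRemoveOccurrences_spec : Claim_equal_secondsToRemoveOccurrences := by
  intro s _
  unfold Spec_secondsToRemoveOccurrences secondsToRemoveOccurrences
  have h := pvLoop_eq s.toList [] 0
  have h0 : pvBestOf ([] : List Int) + ((([] : List Int).length : Int)) = 0 := by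
    simp [pvBestOf]
  rw [h0] at h
  rw [h]
  rfl
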